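-- pv_equiv track=rewrite | github.com/mikeallen39/FlowCache | FlowCache4MAGI-1/inference/pipeline/cache/kv_compressor.py | _compute_new_ranges
-- ===== SOURCE A (Python) =====
-- from typing import Dict, List, Optional, Tuple, Any
--
-- def _compute_new_ranges(
--
--     chunk_ids: List[int],
--     lengths: List[int]
-- ) -> Dict[int, Tuple[int, int]]:
--     """
--     Compute new chunk ranges after compression.
--
--     Args:
--         chunk_ids: List of chunk IDs in order
--         lengths: Compressed lengths for each chunk
--
--     Returns:
--         Dictionary mapping chunk_id to (start, end) range
--     """
--     new_ranges = {}
--     current_start = 0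
--
--     for cid, length in zip(chunk_ids, lengths):
--         new_end = current_start + length
--         new_ranges[cid] = (current_start, new_end)
--         current_start = new_end
--
--     return new_ranges
-- ===== SOURCE B (Python) =====
-- from itertools import accumulate
-- from typing import Dict, List, Tuple
--
-- def _compute_new_ranges(
--     chunk_ids: List[int],
--     lengths: List[int]
-- ) -> Dict[int, Tuple[int, int]]:
--     """Two-phase version: precompute the cumulative boundary table, then pair
--     consecutive boundaries with the chunk ids."""
--     boundaries = list(accumulate(lengths, initial=0))
--     new_ranges = {}
--     for cid, start, end in zip(chunk_ids, boundaries, boundaries[1:]):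
--         new_ranges[cid] = (start, end)
--     return new_ranges
-- ===== Notes on version B (the rewrite author's own statement) =====
-- stated objective: alternative
-- what changed: Replaces the inline running accumulator with a precomputed prefix-sum boundary table (itertools.accumulate with initial=0) and a separate pass that zips chunk ids with consecutive boundary pairs.
import Mathlib
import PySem

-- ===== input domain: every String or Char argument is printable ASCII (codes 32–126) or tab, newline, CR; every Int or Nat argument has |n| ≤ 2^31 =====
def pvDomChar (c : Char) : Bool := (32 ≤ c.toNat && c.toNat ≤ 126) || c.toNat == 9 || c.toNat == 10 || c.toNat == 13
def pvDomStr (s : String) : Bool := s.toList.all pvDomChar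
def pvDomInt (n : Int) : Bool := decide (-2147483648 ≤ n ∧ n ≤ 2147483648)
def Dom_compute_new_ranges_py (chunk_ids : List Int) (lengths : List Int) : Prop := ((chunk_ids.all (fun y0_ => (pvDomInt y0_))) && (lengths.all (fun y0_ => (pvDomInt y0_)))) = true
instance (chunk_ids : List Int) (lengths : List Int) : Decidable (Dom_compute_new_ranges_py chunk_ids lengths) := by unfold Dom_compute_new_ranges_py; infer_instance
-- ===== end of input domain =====

-- B replaces A's inline running accumulator with a precomputed prefix-sum boundary
-- table paired against consecutive entries (alternative decomposition, same cost).


-- ===== PORT A =====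
-- the for-loop over zip(chunk_ids, lengths), carrying (new_ranges, current_start)
def computeNewRangesLoopA (pairs : List (Int × Int)) (new_ranges : PySem.Dict Int (Int × Int))
    (current_start : Int) : PySem.Dict Int (Int × Int) :=
  match pairs with
  | [] => new_ranges
  | (cid, length) :: rest =>
      let new_end := current_start + length
      computeNewRangesLoopA rest (new_ranges.insert cid (current_start, new_end)) new_end

def compute_new_ranges_py (chunk_ids : List Int) (lengths : List Int) : List (Int × Int × Int) :=
  (computeNewRangesLoopA (chunk_ids.zip lengths) PySem.Dict.empty 0).items

-- ===== PORT B =====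
-- boundaries = list(accumulate(lengths, initial=0)) is List.scanl (+) 0;
-- boundaries[1:] is PySem.List.slice boundaries (some 1) none; then one pairing pass.
def compute_new_ranges_py_alt (chunk_ids : List Int) (lengths : List Int) : List (Int × Int × Int) :=
  let boundaries := lengths.scanl (· + ·) 0
  ((chunk_ids.zip (boundaries.zip (PySem.List.slice boundaries (some 1) none))).foldl
      (fun d p => d.insert p.1 (p.2.1, p.2.2)) PySem.Dict.empty).items

-- ===== PRECONDITION & SPEC =====
def Spec_compute_new_ranges_py (chunk_ids : List Int) (lengths : List Int) (out : List (Int × Int × Int)) : Prop := out = compute_new_ranges_py_alt chunk_ids lengths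
instance (chunk_ids : List Int) (lengths : List Int) (out : List (Int × Int × Int)) : Decidable (Spec_compute_new_ranges_py chunk_ids lengths out) := by unfold Spec_compute_new_ranges_py; infer_instance

-- ===== CLAIM (what is proved, stated in full; the proofs are below) =====
def Claim_equal_compute_new_ranges_py : Prop := ∀ (chunk_ids : List Int) (lengths : List Int), Dom_compute_new_ranges_py chunk_ids lengths → Spec_compute_new_ranges_py chunk_ids lengths (compute_new_ranges_py chunk_ids lengths)

-- ===== LEMMAS AND PROOFS =====

-- A's loop is B's fold over the boundary table started at current_start
lemma loopA_eq_foldl_scanl : ∀ (cs ls : List Int) (d : PySem.Dict Int (Int × Int)) (s : Int),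
    computeNewRangesLoopA (cs.zip ls) d s =
      (cs.zip ((ls.scanl (· + ·) s).zip (ls.scanl (· + ·) s).tail)).foldl
        (fun d p => d.insert p.1 (p.2.1, p.2.2)) d := by
  intro cs
  induction cs with
  | nil => intro ls d s; simp [computeNewRangesLoopA]
  | cons c ct ih =>
      intro ls d s
      cases ls with
      | nil => simp [computeNewRangesLoopA]
      | cons l lt =>
          simp only [List.zip_cons_cons, List.scanl, computeNewRangesLoopA]
          rw [ih lt (d.insert c (s, s + l)) (s + l)]
          cases lt with
          | nil => simp [List.scanl]
          | cons l2 lt2 => simp [List.scanl]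

theorem compute_new_ranges_py_spec : Claim_equal_compute_new_ranges_py := by
  intro chunk_ids lengths _
  unfold Spec_compute_new_ranges_py compute_new_ranges_py compute_new_ranges_py_alt
  simp only [PySem.List.slice_from_one]
  rw [loopA_eq_foldl_scanl chunk_ids lengths PySem.Dict.empty 0]
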